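-- pv_equiv track=rewrite | github.com/paiml/depyler | examples/hard_edge_list_partition.py | partition_negative_positive
-- ===== SOURCE A (Python) =====
-- def partition_negative_positive(arr: list[int]) -> list[int]:
--     """Put all negative numbers before non-negative."""
--     neg: list[int] = []
--     pos: list[int] = []
--     i: int = 0
--     while i < len(arr):
--         if arr[i] < 0:
--             neg.append(arr[i])
--         else:
--             pos.append(arr[i])
--         i = i + 1
--     result: list[int] = []
--     j: int = 0
--     while j < len(neg):
--         result.append(neg[j])
--         j = j + 1
--     j = 0
--     while j < len(pos):
--         result.append(pos[j])
--         j = j + 1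
--     return result
-- ===== SOURCE B (Python) =====
-- def partition_negative_positive(arr: list[int]) -> list[int]:
--     """Put all negative numbers before non-negative."""
--     return sorted(arr, key=lambda x: x >= 0)
-- ===== Notes on version B (the rewrite author's own statement) =====
-- stated objective: idiomatic
-- what changed: Replaces the two-bucket index loops and manual concatenation with a single stable sort keyed on the boolean x >= 0 (False sorts first), whose stability preserves the original order within each group.
import Mathlib
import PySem

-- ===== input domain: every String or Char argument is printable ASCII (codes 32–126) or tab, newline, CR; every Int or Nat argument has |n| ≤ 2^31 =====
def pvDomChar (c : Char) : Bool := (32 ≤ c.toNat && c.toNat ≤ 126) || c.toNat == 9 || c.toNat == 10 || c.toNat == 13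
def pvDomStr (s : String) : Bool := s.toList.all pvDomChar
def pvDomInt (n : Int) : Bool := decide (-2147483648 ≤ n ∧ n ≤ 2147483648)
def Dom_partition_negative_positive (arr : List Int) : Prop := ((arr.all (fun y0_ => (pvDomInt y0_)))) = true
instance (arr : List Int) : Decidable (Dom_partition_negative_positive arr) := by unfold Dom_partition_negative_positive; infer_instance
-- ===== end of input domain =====

-- B replaces the two-bucket index loops with one stable sort keyed on (x >= 0); same return value, different algorithm.

-- ===== PORT A =====
-- while i < len(arr): bucket arr[i] into neg/pos; index loop as recursion on the remaining count
def pnpPartLoop (arr : List Int) (i : Nat) (neg pos : List Int) : List Int × List Int :=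
  if h : i < arr.length then
    if arr[i] < 0 then pnpPartLoop arr (i + 1) (neg ++ [arr[i]]) pos
    else pnpPartLoop arr (i + 1) neg (pos ++ [arr[i]])
  else (neg, pos)
termination_by arr.length - i

-- while j < len(src): result.append(src[j])
def pnpCopyLoop (src : List Int) (j : Nat) (result : List Int) : List Int :=
  if h : j < src.length then pnpCopyLoop src (j + 1) (result ++ [src[j]])
  else result
termination_by src.length - j

def partition_negative_positive (arr : List Int) : List Int :=
  let np := pnpPartLoop arr 0 [] []
  let result := pnpCopyLoop np.1 0 []
  pnpCopyLoop np.2 0 result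

-- ===== PORT B =====
def partition_negative_positive_alt (arr : List Int) : List Int :=
  PySem.List.sorted arr (fun x => decide (0 ≤ x)) false

-- ===== PRECONDITION & SPEC =====
def Spec_partition_negative_positive (arr : List Int) (out : List Int) : Prop := out = partition_negative_positive_alt arr
instance (arr : List Int) (out : List Int) : Decidable (Spec_partition_negative_positive arr out) := by unfold Spec_partition_negative_positive; infer_instance

-- ===== CLAIM (what is proved, stated in full; the proofs are below) =====
def Claim_equal_partition_negative_positive : Prop := ∀ (arr : List Int), Dom_partition_negative_positive arr → Spec_partition_negative_positive arr (partition_negative_positive arr)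

-- ===== LEMMAS AND PROOFS =====

theorem pnpCopyLoop_eq (src : List Int) (j : Nat) (result : List Int) :
    pnpCopyLoop src j result = result ++ src.drop j := by
  fun_induction pnpCopyLoop src j result with
  | case1 j result h ih =>
      rw [ih, List.append_assoc]
      congr 1
      rw [List.drop_eq_getElem_cons h]
      simp
  | case2 j result h =>
      rw [List.drop_of_length_le (by omega)]
      simp

theorem pnpPartLoop_eq (arr : List Int) (i : Nat) (neg pos : List Int) :
    pnpPartLoop arr i neg pos =
      (neg ++ (arr.drop i).filter (fun x => decide (x < 0)),
       pos ++ (arr.drop i).filter (fun x => !decide (x < 0))) := by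
  fun_induction pnpPartLoop arr i neg pos with
  | case1 i neg pos h hneg ih =>
      rw [ih, List.drop_eq_getElem_cons h]
      generalize List.drop (i + 1) arr = t
      simp [hneg]
  | case2 i neg pos h hneg ih =>
      rw [ih, List.drop_eq_getElem_cons h]
      generalize List.drop (i + 1) arr = t
      simp [hneg]
  | case3 i neg pos h =>
      rw [List.drop_of_length_le (by omega)]
      simp

theorem pnpInsert_nonneg (x : Int) (hx : 0 ≤ x) (ys : List Int) :
    PySem.List.insertBy (fun a b => decide ((decide (0 ≤ a) : Bool) < (decide (0 ≤ b) : Bool))) x ys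
      = ys ++ [x] := by
  induction ys with
  | nil => rfl
  | cons y ys ih =>
      rw [PySem.List.insertBy]
      have : (decide ((decide (0 ≤ x) : Bool) < (decide (0 ≤ y) : Bool))) = false := by
        simp [Bool.lt_iff, hx]
      simp [this, ih]

theorem pnpInsert_neg (x : Int) (hx : x < 0) (neg pos : List Int)
    (hneg : ∀ a ∈ neg, a < 0) (hpos : ∀ a ∈ pos, 0 ≤ a) :
    PySem.List.insertBy (fun a b => decide ((decide (0 ≤ a) : Bool) < (decide (0 ≤ b) : Bool))) x (neg ++ pos)
      = neg ++ x :: pos := by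
  induction neg with
  | nil =>
      cases pos with
      | nil => rfl
      | cons p ps =>
          rw [List.nil_append, PySem.List.insertBy]
          have hp : 0 ≤ p := hpos p (by simp)
          have : (decide ((decide (0 ≤ x) : Bool) < (decide (0 ≤ p) : Bool))) = true := by
            simp [hp, show ¬ (0 ≤ x) by omega, Bool.lt_iff]
          simp [this]
  | cons n ns ih =>
      rw [List.cons_append, PySem.List.insertBy]
      have hn : n < 0 := hneg n (by simp)
      have : (decide ((decide (0 ≤ x) : Bool) < (decide (0 ≤ n) : Bool))) = false := by
        simp [show ¬ (0 ≤ n) by omega, Bool.lt_iff]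
      have hrec := ih (fun a ha => hneg a (List.mem_cons_of_mem _ ha))
      simp [this, hrec]

theorem pnpFoldl_eq (xs : List Int) (neg pos : List Int)
    (hneg : ∀ a ∈ neg, a < 0) (hpos : ∀ a ∈ pos, 0 ≤ a) :
    xs.foldl (fun acc x =>
        PySem.List.insertBy (fun a b => decide ((decide (0 ≤ a) : Bool) < (decide (0 ≤ b) : Bool))) x acc)
      (neg ++ pos)
    = (neg ++ xs.filter (fun x => decide (x < 0))) ++ (pos ++ xs.filter (fun x => !decide (x < 0))) := by
  induction xs generalizing neg pos with
  | nil => simp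
  | cons x xs ih =>
      rw [List.foldl_cons]
      by_cases hx : x < 0
      · have h1 : ∀ a ∈ neg ++ [x], a < 0 := by
          intro a ha
          rcases List.mem_append.mp ha with h | h
          · exact hneg a h
          · simp at h; omega
        rw [pnpInsert_neg x hx neg pos hneg hpos,
          show neg ++ x :: pos = (neg ++ [x]) ++ pos by simp,
          ih (neg ++ [x]) pos h1 hpos]
        simp [hx]
      · have hx' : 0 ≤ x := by omega
        have h2 : ∀ a ∈ pos ++ [x], 0 ≤ a := by
          intro a ha
          rcases List.mem_append.mp ha with h | h
          · exact hpos a h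
          · simp at h; omega
        rw [pnpInsert_nonneg x hx' (neg ++ pos), List.append_assoc,
          ih neg (pos ++ [x]) hneg h2]
        simp [hx]

-- ===== VERDICT (by name: the statement is the Claim_ definition above) =====
theorem partition_negative_positive_spec : Claim_equal_partition_negative_positive := by
  intro arr _
  unfold Spec_partition_negative_positive partition_negative_positive partition_negative_positive_alt
  rw [pnpPartLoop_eq]
  simp only [pnpCopyLoop_eq, List.drop_zero, List.nil_append]
  rw [PySem.List.sorted]
  simpa using (pnpFoldl_eq arr [] [] (by simp) (by simp)).symm
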